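-- pv_equiv track=rewrite | github.com/skybber/czsky | imports/import_hnsky_fixes.py | _denormalize_pk_name
-- ===== SOURCE A (Python) =====
-- def _denormalize_pk_name(name):
--     denorm = ''
--     compress = True
--     outp = False
--     for i in range(0, len(name)):
--         c = name[i]
--         if compress and c == '0':
--             continue
--         if not c.isdigit():
--             if not outp:
--                 denorm += '0'
--             compress = True
--             outp = False
--         else:
--             outp = True
--             compress = False
--         denorm += c
--     return denorm
-- ===== SOURCE B (Python) =====
-- def _denormalize_pk_name(name):
--     # run-based: split into maximal digit / non-digit runs, handle each run whole
--     parts = []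
--     outp = False
--     i = 0
--     n = len(name)
--     while i < n:
--         d = name[i].isdigit()
--         j = i + 1
--         while j < n and name[j].isdigit() == d:
--             j += 1
--         run = name[i:j]
--         if d:
--             s = run.lstrip('0')
--             parts.append(s)
--             outp = bool(s)
--         else:
--             parts.append(('' if outp else '0') + '0'.join(run))
--             outp = False
--         i = j
--     return ''.join(parts)
-- ===== Notes on version B (the rewrite author's own statement) =====
-- stated objective: alternative
-- what changed: Replaces the char-by-char three-flag state machine with a run-based pass: the string is split into maximal digit/non-digit runs and each run is handled whole (leading-zero stripping for digit runs, zero-interspersion for non-digit runs), joining the collected parts at the end.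
import Mathlib
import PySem

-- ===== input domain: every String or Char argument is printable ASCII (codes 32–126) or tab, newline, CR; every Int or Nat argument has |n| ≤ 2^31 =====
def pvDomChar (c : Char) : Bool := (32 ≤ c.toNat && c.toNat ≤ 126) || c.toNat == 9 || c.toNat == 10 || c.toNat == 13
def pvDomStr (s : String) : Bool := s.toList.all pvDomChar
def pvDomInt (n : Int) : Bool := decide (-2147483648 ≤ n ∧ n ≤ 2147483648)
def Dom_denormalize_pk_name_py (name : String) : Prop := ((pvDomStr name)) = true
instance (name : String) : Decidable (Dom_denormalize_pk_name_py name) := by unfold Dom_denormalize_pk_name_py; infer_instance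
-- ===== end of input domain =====

-- B replaces A's char-by-char three-flag state machine with a run-based pass over maximal
-- digit / non-digit runs (alternative decomposition, same exact return value).


-- ===== PORT A =====
-- state = (denorm, compress, outp); one step of A's for-loop body
def pvAStep (st : List Char × Bool × Bool) (c : Char) : List Char × Bool × Bool :=
  if st.2.1 && (c == '0') then st
  else if !(PySem.Chars.isdigit c) then
    ((if !st.2.2 then st.1 ++ ['0'] else st.1) ++ [c], true, false)
  else
    (st.1 ++ [c], false, true)

def denormalize_pk_name_py (name : String) : String :=
  String.ofList ((name.toList.foldl pvAStep ([], true, false)).1)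

-- ===== PORT B =====
-- run-based: peel one maximal digit / non-digit run per call (Source B's outer while-loop)
def pvBGo : List Char → Bool → List Char
  | [], _ => []
  | c :: rest, outp =>
    let d := PySem.Chars.isdigit c
    let run := c :: rest.takeWhile (fun x => PySem.Chars.isdigit x == d)
    let rest' := rest.dropWhile (fun x => PySem.Chars.isdigit x == d)
    if d then
      let s := run.dropWhile (fun x => x == '0')
      s ++ pvBGo rest' (!s.isEmpty)
    else
      (if outp then [] else ['0']) ++ List.intersperse '0' run ++ pvBGo rest' false
termination_by l _ => l.length
decreasing_by all_goals simp only [List.length_cons]; exact Nat.lt_succ_of_le (List.length_dropWhile_le _ _)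

def denormalize_pk_name_py_alt (name : String) : String :=
  String.ofList (pvBGo name.toList false)

-- ===== PRECONDITION & SPEC =====
def Spec_denormalize_pk_name_py (name : String) (out : String) : Prop := out = denormalize_pk_name_py_alt name
instance (name : String) (out : String) : Decidable (Spec_denormalize_pk_name_py name out) := by unfold Spec_denormalize_pk_name_py; infer_instance

-- ===== CLAIM (what is proved, stated in full; the proofs are below) =====
def Claim_equal_denormalize_pk_name_py : Prop := ∀ (name : String), Dom_denormalize_pk_name_py name → Spec_denormalize_pk_name_py name (denormalize_pk_name_py name)

-- ===== LEMMAS AND PROOFS =====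

-- one step of A appends only to the denorm component: an outer prefix factors out
lemma pvAStep_shift (acc : List Char) (st : List Char × Bool × Bool) (c : Char) :
    pvAStep (acc ++ st.1, st.2) c = (acc ++ (pvAStep st c).1, (pvAStep st c).2) := by
  obtain ⟨e, cp, op⟩ := st
  simp only [pvAStep]
  split_ifs <;> simp_all [List.append_assoc]

lemma pvA_shift (l : List Char) : ∀ (acc : List Char) (st : List Char × Bool × Bool),
    l.foldl pvAStep (acc ++ st.1, st.2)
      = (acc ++ (l.foldl pvAStep st).1, (l.foldl pvAStep st).2) := by
  induction l with
  | nil => intro acc st; simp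
  | cons c l ih =>
    intro acc st
    rw [List.foldl_cons, List.foldl_cons, pvAStep_shift acc st c, ih acc (pvAStep st c)]

-- the convenient instance: empty inner accumulator
lemma pvA_shift' (l acc : List Char) (cp op : Bool) :
    l.foldl pvAStep (acc, cp, op)
      = (acc ++ (l.foldl pvAStep ([], cp, op)).1, (l.foldl pvAStep ([], cp, op)).2) := by
  simpa using pvA_shift l acc ([], cp, op)

-- after the first nonzero digit of a run: every further digit is just appended
lemma pvA_digits_tail (l : List Char) : ∀ (acc : List Char),
    (∀ x ∈ l, PySem.Chars.isdigit x = true) →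
    l.foldl pvAStep (acc, false, true) = (acc ++ l, false, true) := by
  induction l with
  | nil => intro acc _; simp
  | cons c l ih =>
    intro acc h
    have hc : PySem.Chars.isdigit c = true := h c (by simp)
    rw [List.foldl_cons, show pvAStep (acc, false, true) c = (acc ++ [c], false, true) by
      simp [pvAStep, hc]]
    rw [ih (acc ++ [c]) (fun x hx => h x (by simp [hx]))]
    simp

-- a whole digit run processed from a fresh (compress, ¬outp) state: leading zeros stripped
lemma pvA_digit_run (l : List Char) : ∀ (acc : List Char),
    (∀ x ∈ l, PySem.Chars.isdigit x = true) →
    l.foldl pvAStep (acc, true, false)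
      = (acc ++ l.dropWhile (fun x => x == '0'),
         (l.dropWhile (fun x => x == '0')).isEmpty,
         !(l.dropWhile (fun x => x == '0')).isEmpty) := by
  induction l with
  | nil => intro acc _; simp
  | cons c l ih =>
    intro acc h
    have hc : PySem.Chars.isdigit c = true := h c (by simp)
    by_cases h0 : (c == '0') = true
    · rw [List.foldl_cons, show pvAStep (acc, true, false) c = (acc, true, false) by
        simp [pvAStep, h0]]
      rw [ih acc (fun x hx => h x (by simp [hx])), List.dropWhile_cons]
      simp [h0]
    · rw [List.foldl_cons, show pvAStep (acc, true, false) c = (acc ++ [c], false, true) by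
        simp [pvAStep, h0, hc]]
      rw [pvA_digits_tail l (acc ++ [c]) (fun x hx => h x (by simp [hx])), List.dropWhile_cons]
      simp [h0]

-- a non-digit char is never '0'
lemma pvA_ne_zero {c : Char} (h : PySem.Chars.isdigit c = false) : (c == '0') = false := by
  cases hb : (c == '0') with
  | false => rfl
  | true =>
    have : c = '0' := beq_iff_eq.mp hb
    subst this
    exact absurd h (by decide)

-- tail of a non-digit run (outp is false after the first char): '0' before every char
lemma pvA_nondigits_tail (l : List Char) : ∀ (acc : List Char),
    (∀ x ∈ l, PySem.Chars.isdigit x = false) →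
    l.foldl pvAStep (acc, true, false)
      = (acc ++ l.flatMap (fun x => ['0', x]), true, false) := by
  induction l with
  | nil => intro acc _; simp
  | cons c l ih =>
    intro acc h
    have hc : PySem.Chars.isdigit c = false := h c (by simp)
    rw [List.foldl_cons, show pvAStep (acc, true, false) c = (acc ++ ['0'] ++ [c], true, false) by
      simp [pvAStep, pvA_ne_zero hc, hc]]
    rw [ih (acc ++ ['0'] ++ [c]) (fun x hx => h x (by simp [hx]))]
    simp

lemma pv_intersperse_flat (l : List Char) : ∀ (c : Char),
    List.intersperse '0' (c :: l) = c :: l.flatMap (fun x => ['0', x]) := by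
  induction l with
  | nil => intro c; simp
  | cons x l ih =>
    intro c
    rw [List.intersperse_cons₂, ih x]
    simp

-- a whole non-digit run, from any flags: '0' inserted before each char except (when outp) the first
lemma pvA_nondigit_run (l : List Char) (c : Char) (acc : List Char) (cp op : Bool)
    (hc : PySem.Chars.isdigit c = false) (h : ∀ x ∈ l, PySem.Chars.isdigit x = false) :
    (c :: l).foldl pvAStep (acc, cp, op)
      = (acc ++ ((if op then [] else ['0']) ++ List.intersperse '0' (c :: l)), true, false) := by
  rw [List.foldl_cons, show pvAStep (acc, cp, op) c
      = ((if !op then acc ++ ['0'] else acc) ++ [c], true, false) by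
    simp [pvAStep, pvA_ne_zero hc, hc]]
  rw [pvA_nondigits_tail l _ h, pv_intersperse_flat l c]
  cases op <;> simp

lemma pv_head_dropWhile {p : Char → Bool} {l : List Char} {x : Char}
    (h : (l.dropWhile p).head? = some x) : p x = false := by
  induction l with
  | nil => simp at h
  | cons a l ih =>
    rw [List.dropWhile_cons] at h
    split at h
    · exact ih h
    · simp_all

-- main run-induction: A's fold from a run boundary computes B's recursion
lemma pv_main : ∀ (n : Nat) (l : List Char), l.length ≤ n → ∀ (cp op : Bool),
    (∀ c, l.head? = some c → PySem.Chars.isdigit c = true → cp = true ∧ op = false) →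
    (l.foldl pvAStep ([], cp, op)).1 = pvBGo l op := by
  intro n
  induction n with
  | zero =>
    intro l hl cp op _
    have : l = [] := List.eq_nil_of_length_eq_zero (Nat.le_zero.mp hl)
    subst this; simp [pvBGo]
  | succ n ih =>
    intro l hl cp op hhead
    match l with
    | [] => simp [pvBGo]
    | c :: rest =>
      cases hd : PySem.Chars.isdigit c with
      | true =>
        obtain ⟨hcp, hop⟩ := hhead c rfl hd
        subst hcp; subst hop
        have hsplit : c :: rest
            = (c :: rest.takeWhile (fun x => PySem.Chars.isdigit x == true))
              ++ rest.dropWhile (fun x => PySem.Chars.isdigit x == true) := by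
          simp
        conv_lhs => rw [hsplit]
        rw [List.foldl_append]
        have hrun : ∀ x ∈ c :: rest.takeWhile (fun x => PySem.Chars.isdigit x == true),
            PySem.Chars.isdigit x = true := by
          intro x hx
          rcases List.mem_cons.mp hx with h | hx
          · exact h ▸ hd
          · simpa using List.mem_takeWhile_imp hx
        rw [pvA_digit_run _ [] hrun]
        simp only [List.nil_append]
        set s := ((c :: rest.takeWhile (fun x => PySem.Chars.isdigit x == true)).dropWhile
          (fun x => x == '0')) with hs
        have hlen : (rest.dropWhile (fun x => PySem.Chars.isdigit x == true)).length ≤ n := by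
          have h1 := List.length_dropWhile_le (fun x => PySem.Chars.isdigit x == true) rest
          simp only [List.length_cons] at hl
          omega
        have hrest := ih (rest.dropWhile (fun x => PySem.Chars.isdigit x == true)) hlen
          s.isEmpty (!s.isEmpty)
          (by
            intro c' hc' hdig
            have := pv_head_dropWhile hc'
            simp [hdig] at this)
        rw [pvA_shift' _ s _ _, hrest]
        simp [pvBGo, hd, hs]
      | false =>
        have hsplit : c :: rest
            = (c :: rest.takeWhile (fun x => PySem.Chars.isdigit x == false))
              ++ rest.dropWhile (fun x => PySem.Chars.isdigit x == false) := by
          simp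
        conv_lhs => rw [hsplit]
        rw [List.foldl_append]
        have hrun : ∀ x ∈ rest.takeWhile (fun x => PySem.Chars.isdigit x == false),
            PySem.Chars.isdigit x = false := by
          intro x hx; simpa using List.mem_takeWhile_imp hx
        rw [pvA_nondigit_run _ c [] cp op hd hrun]
        have hlen : (rest.dropWhile (fun x => PySem.Chars.isdigit x == false)).length ≤ n := by
          have h1 := List.length_dropWhile_le (fun x => PySem.Chars.isdigit x == false) rest
          simp only [List.length_cons] at hl
          omega
        have hrest := ih (rest.dropWhile (fun x => PySem.Chars.isdigit x == false)) hlen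
          true false (by intro _ _ _; exact ⟨rfl, rfl⟩)
        rw [List.nil_append, pvA_shift' _ _ _ _, hrest]
        simp [pvBGo, hd]

-- ===== VERDICT (by name: the statement is the Claim_ definition above) =====
theorem denormalize_pk_name_py_spec : Claim_equal_denormalize_pk_name_py := by
  intro name _
  unfold Spec_denormalize_pk_name_py denormalize_pk_name_py denormalize_pk_name_py_alt
  rw [pv_main name.toList.length name.toList (le_refl _) true false
    (by intro _ _ _; exact ⟨rfl, rfl⟩)]
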